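-- pv_equiv track=rewrite | github.com/xx-ue/CSC1008-DSA | C1008-DSA-Proj-main/Matching.py | matchingBacktracking
-- ===== SOURCE A (Python) =====
-- def matchingBacktracking(numberOfDrivers, numberOfRiders):
--     # set to determine if the column is used
--     col = set()
--     # contains all possible outcome
--     res = []
--     # initialize all the table to be 0
--     board = [["0"] * numberOfRiders for i in range(numberOfDrivers)]
--     # backtracking function
--     def backtrack(r):
--         # if r equals to number of drivers stop
--         if r == numberOfDrivers:
--             # create a copy of the board
--             copy = [list(row) for row in board]
--             # append the results into res
--             res.append(copy)
--             return
--
--         for c in range(numberOfRiders):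
--             # if c in set of col, continue
--             if c in col:
--                 continue
--             # if c not in set of col, set the current table box to 1 and add c into set of col
--             col.add(c)
--             board[r][c] = "1"
--             # recursively call the function
--             backtrack(r + 1)
--             # remove the col in the set of col and set it back to 0
--             col.remove(c)
--             board[r][c] = "0"
--     # start backtracking
--     backtrack(0)
--     # return all possible answer
--     return res
-- ===== SOURCE B (Python) =====
-- def matchingBacktracking(numberOfDrivers, numberOfRiders):
--     # A negative number of drivers admits no assignment.
--     if numberOfDrivers < 0:
--         return []
--     # Grow all injective column assignments layer by layer (breadth-first),
--     # one driver per round; order stays lexicographic.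
--     assignments = [[]]
--     for _ in range(numberOfDrivers):
--         assignments = [p + [c] for p in assignments
--                        for c in range(numberOfRiders) if c not in p]
--     # Render each assignment as a 0/1 board, one fresh one-hot row per driver.
--     return [[["1" if j == c else "0" for j in range(numberOfRiders)] for c in p]
--             for p in assignments]
-- ===== Notes on version B (the rewrite author's own statement) =====
-- stated objective: simpler
-- what changed: Replaces the recursive backtracking over a mutated shared board and column set by an iterative layer-by-layer construction of all injective assignments followed by a single rendering pass into fresh one-hot boards.
import Mathlib
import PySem

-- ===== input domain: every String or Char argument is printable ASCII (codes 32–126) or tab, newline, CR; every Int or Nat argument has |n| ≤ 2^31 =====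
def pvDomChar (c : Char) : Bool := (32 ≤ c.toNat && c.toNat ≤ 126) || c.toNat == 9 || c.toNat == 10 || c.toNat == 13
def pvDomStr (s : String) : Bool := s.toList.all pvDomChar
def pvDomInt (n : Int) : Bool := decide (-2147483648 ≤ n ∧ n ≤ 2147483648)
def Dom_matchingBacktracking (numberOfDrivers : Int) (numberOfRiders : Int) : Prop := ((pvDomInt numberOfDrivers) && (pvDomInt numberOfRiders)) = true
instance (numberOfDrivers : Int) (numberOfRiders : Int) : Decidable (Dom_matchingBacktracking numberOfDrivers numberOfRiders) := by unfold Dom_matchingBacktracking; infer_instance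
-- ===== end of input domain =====

-- B replaces A's recursive backtracking over a mutated board/column-set by an iterative
-- layer-by-layer construction of the injective assignments plus one rendering pass (simpler).


-- ===== PORT A =====
-- ["0"] * numberOfRiders  (Python repetition clamps a negative count to the empty list; exact)
def pvZeroRow (numberOfRiders : Int) : List String := List.replicate numberOfRiders.toNat "0"

-- board[r][c] = v  (two subscripts; r and c are provably nonnegative and in range on every
-- executed call, where pyGetD/pySetD are exact)
def pvSetCell (board : List (List String)) (r c : Int) (v : String) : List (List String) :=
  PySem.List.pySetD board r (PySem.List.pySetD (PySem.List.pyGetD board r []) c v)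

-- the nested function backtrack(r), threading the mutated state (col, board, res);
-- fuel only bounds the recursion depth (A's recursion depth is ≤ numberOfDrivers + 1
-- whenever it terminates without raising)
def pvBacktrack (numberOfDrivers numberOfRiders : Int) :
    Nat → Int → PySem.Set Int → List (List String) → List (List (List String)) →
    PySem.Set Int × List (List String) × List (List (List String))
  | 0, _, col, board, res => (col, board, res)
  | fuel+1, r, col, board, res =>
    if r == numberOfDrivers then
      -- copy = [list(row) for row in board]; res.append(copy)
      (col, board, res ++ [board.map (fun row => row)])
    else
      (PySem.List.pyRange 0 numberOfRiders 1).foldl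
        (fun st c =>
          if PySem.Set.contains st.1 c then st
          else
            let st' := pvBacktrack numberOfDrivers numberOfRiders fuel (r + 1)
                (PySem.Set.add st.1 c) (pvSetCell st.2.1 r c "1") st.2.2
            -- col.remove(c): c is always a member here, so remove? never raises
            ((PySem.Set.remove? st'.1 c).getD st'.1, pvSetCell st'.2.1 r c "0", st'.2.2))
        (col, board, res)

def matchingBacktracking (numberOfDrivers : Int) (numberOfRiders : Int) : List (List (List String)) :=
  let board := (PySem.List.pyRange 0 numberOfDrivers 1).map (fun _ => pvZeroRow numberOfRiders)
  (pvBacktrack numberOfDrivers numberOfRiders (numberOfDrivers.toNat + 1) 0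
    PySem.Set.empty board []).2.2

-- ===== PORT B =====
def matchingBacktracking_alt (numberOfDrivers : Int) (numberOfRiders : Int) : List (List (List String)) :=
  if numberOfDrivers < 0 then []
  else
    let assignments := (PySem.List.pyRange 0 numberOfDrivers 1).foldl
      (fun acc _ => acc.flatMap (fun p =>
        ((PySem.List.pyRange 0 numberOfRiders 1).filter (fun c => !(p.contains c))).map
          (fun c => p ++ [c])))
      [[]]
    assignments.map (fun p => p.map (fun c =>
      (PySem.List.pyRange 0 numberOfRiders 1).map (fun j => if j == c then "1" else "0")))

-- ===== PRECONDITION & SPEC =====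
-- Pre_ excludes exactly the inputs where A raises IndexError: a negative driver count with a
-- positive rider count (board is empty there but backtrack still writes board[0][c]).
def Pre_matchingBacktracking (numberOfDrivers : Int) (numberOfRiders : Int) : Prop :=
  0 ≤ numberOfDrivers ∨ numberOfRiders ≤ 0
instance (numberOfDrivers : Int) (numberOfRiders : Int) : Decidable (Pre_matchingBacktracking numberOfDrivers numberOfRiders) := by unfold Pre_matchingBacktracking; infer_instance
def pvWitness_matchingBacktracking : Int × Int := (2, 2)

def Spec_matchingBacktracking (numberOfDrivers : Int) (numberOfRiders : Int) (out : List (List (List String))) : Prop := out = matchingBacktracking_alt numberOfDrivers numberOfRiders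
instance (numberOfDrivers : Int) (numberOfRiders : Int) (out : List (List (List String))) : Decidable (Spec_matchingBacktracking numberOfDrivers numberOfRiders out) := by unfold Spec_matchingBacktracking; infer_instance

-- ===== CLAIM (what is proved, stated in full; the proofs are below) =====
def Claim_equal_matchingBacktracking : Prop := ∀ (numberOfDrivers : Int) (numberOfRiders : Int), Dom_matchingBacktracking numberOfDrivers numberOfRiders → Pre_matchingBacktracking numberOfDrivers numberOfRiders → Spec_matchingBacktracking numberOfDrivers numberOfRiders (matchingBacktracking numberOfDrivers numberOfRiders)

-- ===== LEMMAS AND PROOFS =====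

-- one-hot row for column c
def pvOneHot (numberOfRiders c : Int) : List String :=
  (PySem.List.pyRange 0 numberOfRiders 1).map (fun j => if j == c then "1" else "0")

-- the extensions of a partial assignment p by one more distinct column (B's inner comprehension)
def pvExts (numberOfRiders : Int) (p : List Int) : List (List Int) :=
  ((PySem.List.pyRange 0 numberOfRiders 1).filter (fun c => !(p.contains c))).map (fun c => p ++ [c])

-- the DFS list of all length-d injective extensions of p, in A's order
def pvDext (numberOfRiders : Int) : Nat → List Int → List (List Int)
  | 0, p => [p]
  | d+1, p => (pvExts numberOfRiders p).flatMap (pvDext numberOfRiders d)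

-- B's one layer step
def pvStep (numberOfRiders : Int) (acc : List (List Int)) : List (List Int) :=
  acc.flatMap (pvExts numberOfRiders)

theorem pv_map_const {α β : Type} (b : β) : ∀ (l : List α), l.map (fun _ => b) = List.replicate l.length b := by
  intro l; induction l with
  | nil => rfl
  | cons x xs ih => simp [List.replicate_succ, ih]

theorem pv_flatMap_congr {α β : Type} {f g : α → List β} :
    ∀ (l : List α), (∀ x ∈ l, f x = g x) → l.flatMap f = l.flatMap g := by
  intro l; induction l with
  | nil => intro _; rfl
  | cons x xs ih =>
    intro h
    simp only [List.flatMap_cons, h x (by simp), ih (fun y hy => h y (by simp [hy]))]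

theorem pv_set_append_cons {α : Type} (xs : List α) (y : α) (ys : List α) (v : α) :
    (xs ++ y :: ys).set xs.length v = xs ++ v :: ys := by
  induction xs with
  | nil => rfl
  | cons x xs ih => simp [ih]

theorem pv_getD_append_cons {α : Type} (xs : List α) (y : α) (ys : List α) (d : α) :
    (xs ++ y :: ys).getD xs.length d = y := by
  induction xs with
  | nil => rfl
  | cons x xs ih => simpa using ih

theorem pvSetCell_at (xs : List (List String)) (row : List String) (ys : List (List String))
    (c : Int) (v : String) (hc : 0 ≤ c) :
    pvSetCell (xs ++ row :: ys) (xs.length : Int) c v = xs ++ (row.set c.toNat v) :: ys := by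
  have h1 : (0:Int) ≤ (xs.length : Int) := Int.natCast_nonneg _
  unfold pvSetCell
  rw [PySem.List.pySetD_of_nonneg _ _ hc, PySem.List.pyGetD_of_nonneg _ _ h1,
      PySem.List.pySetD_of_nonneg _ _ h1]
  simp [pv_getD_append_cons, pv_set_append_cons]

theorem pvOneHot_eq_set (nR c : Int) (h0 : 0 ≤ c) (h1 : c < nR) :
    pvOneHot nR c = (pvZeroRow nR).set c.toNat "1" := by
  unfold pvOneHot pvZeroRow
  rw [PySem.List.pyRange_one, List.map_map]
  apply List.ext_getElem
  · simp
  · intro k hk1 hk2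
    simp only [List.getElem_map, List.getElem_range, Function.comp_apply, List.getElem_set,
      List.getElem_replicate]
    by_cases h : k = c.toNat
    · have : ((0:Int) + (k:Int) == c) = true := by simp only [beq_iff_eq]; omega
      simp only [this, if_true, List.getElem_replicate]
      rw [if_pos h.symm]
    · have : ((0:Int) + (k:Int) == c) = false := by
        simp only [beq_eq_false_iff_ne, ne_eq]; omega
      simp only [this, Bool.false_eq_true, if_false, List.getElem_replicate]
      rw [if_neg (fun e => h e.symm)]

theorem pvOneHot_reset (nR c : Int) (h0 : 0 ≤ c) (h1 : c < nR) :
    (pvOneHot nR c).set c.toNat "0" = pvZeroRow nR := by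
  rw [pvOneHot_eq_set nR c h0 h1]
  unfold pvZeroRow
  rw [List.set_set]
  apply List.ext_getElem
  · simp
  · intro k hk1 hk2
    rw [List.getElem_set]
    split <;> simp

theorem pv_discard_append (p : List Int) (c : Int) (h : c ∉ p) :
    PySem.Set.discard (p ++ [c]) c = p := by
  unfold PySem.Set.discard
  rw [List.filter_append]
  have h1 : p.filter (fun y => !(y == c)) = p := by
    apply List.filter_eq_self.mpr
    intro a ha
    simp only [Bool.not_eq_eq_eq_not, Bool.not_true, beq_eq_false_iff_ne, ne_eq]
    rintro rfl; exact h ha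
  simp [h1]

theorem pv_foldl_const {α β : Type} (f : α → α) :
    ∀ (l : List β) (init : α), l.foldl (fun a _ => f a) init = f^[l.length] init := by
  intro l; induction l with
  | nil => intro init; rfl
  | cons x xs ih => intro init; simp [ih, Function.iterate_succ_apply]

theorem pv_iterate_step_flatMap (nR : Int) (d : Nat) :
    ∀ xs : List (List Int), (pvStep nR)^[d] xs = xs.flatMap (fun x => (pvStep nR)^[d] [x]) := by
  induction d with
  | zero => intro xs; simp
  | succ d ih =>
    intro xs
    simp only [Function.iterate_succ_apply]
    show (pvStep nR)^[d] (pvStep nR xs) = xs.flatMap fun x => (pvStep nR)^[d] (pvStep nR [x])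
    rw [pvStep, ih, List.flatMap_assoc]
    apply pv_flatMap_congr
    intro x _
    rw [← ih]
    congr 1
    simp [pvStep]

theorem pvDext_eq_iterate (nR : Int) (d : Nat) :
    ∀ p : List Int, pvDext nR d p = (pvStep nR)^[d] [p] := by
  induction d with
  | zero => intro p; rfl
  | succ d ih =>
    intro p
    simp only [Function.iterate_succ_apply]
    have hstep : pvStep nR [p] = pvExts nR p := by simp [pvStep]
    rw [hstep, pv_iterate_step_flatMap, pvDext]
    apply pv_flatMap_congr
    intro q _
    exact ih q

theorem pvBacktrack_spec (nD nR : Int) (hD : 0 ≤ nD) :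
    ∀ (d : Nat) (p : List Int) (res : List (List (List String))),
      p.Nodup → (∀ c ∈ p, 0 ≤ c ∧ c < nR) → p.length + d = nD.toNat →
      pvBacktrack nD nR (d+1) (p.length : Int) p
          (p.map (pvOneHot nR) ++ List.replicate d (pvZeroRow nR)) res
        = (p, p.map (pvOneHot nR) ++ List.replicate d (pvZeroRow nR),
           res ++ (pvDext nR d p).map (fun q => q.map (pvOneHot nR))) := by
  intro d
  induction d with
  | zero =>
    intro p res hnd hb hlen
    have hr : ((p.length : Int) == nD) = true := by simp only [beq_iff_eq]; omega
    simp [pvBacktrack, hr, pvDext]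
  | succ d IH =>
    intro p res hnd hb hlen
    have hr : ((p.length : Int) == nD) = false := by
      simp only [beq_eq_false_iff_ne, ne_eq]; omega
    rw [pvBacktrack, hr]
    simp only [Bool.false_eq_true, if_false]
    have loop : ∀ (cs : List Int), (∀ c ∈ cs, 0 ≤ c ∧ c < nR) → ∀ (res : List (List (List String))),
        cs.foldl
          (fun st c =>
            if PySem.Set.contains st.1 c then st
            else
              let st' := pvBacktrack nD nR (d+1) ((p.length : Int) + 1)
                  (PySem.Set.add st.1 c) (pvSetCell st.2.1 (p.length : Int) c "1") st.2.2
              ((PySem.Set.remove? st'.1 c).getD st'.1,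
               pvSetCell st'.2.1 (p.length : Int) c "0", st'.2.2))
          (p, p.map (pvOneHot nR) ++ List.replicate (d+1) (pvZeroRow nR), res)
        = (p, p.map (pvOneHot nR) ++ List.replicate (d+1) (pvZeroRow nR),
           res ++ (cs.filter (fun c => !(p.contains c))).flatMap
             (fun c => (pvDext nR d (p ++ [c])).map (fun q => q.map (pvOneHot nR)))) := by
      intro cs
      induction cs with
      | nil => intro _ res; simp
      | cons c cs ihcs =>
        intro hcs res
        rw [List.foldl_cons]
        by_cases hc : c ∈ p
        · have h1 : PySem.Set.contains p c = true := (PySem.Set.contains_iff p c).mpr hc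
          have h2 : p.contains c = true := List.contains_iff_mem.mpr hc
          simp only [h1, if_true]
          rw [ihcs (fun x hx => hcs x (by simp [hx])) res]
          simp [List.filter_cons, hc]
        · obtain ⟨hc0, hc1⟩ := hcs c (by simp)
          have h1 : PySem.Set.contains p c = false := by
            simp only [PySem.Set.contains]
            simpa using hc
          have h2 : p.contains c = false := by simpa using hc
          simp only [h1, Bool.false_eq_true, if_false]
          -- rewrite the arguments of the recursive call
          have hadd : PySem.Set.add p c = p ++ [c] := PySem.Set.add_of_not_mem hc
          have hset1 : pvSetCell (p.map (pvOneHot nR) ++ List.replicate (d+1) (pvZeroRow nR))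
              ((p.length : Int)) c "1"
              = (p ++ [c]).map (pvOneHot nR) ++ List.replicate d (pvZeroRow nR) := by
            rw [List.replicate_succ,
                show ((p.length : Int)) = (((p.map (pvOneHot nR)).length : Int)) by simp,
                pvSetCell_at _ _ _ _ _ hc0, ← pvOneHot_eq_set nR c hc0 hc1]
            simp
          have hnd' : (p ++ [c]).Nodup := by
            rw [List.nodup_append]
            exact ⟨hnd, by simp, fun a ha b hb => by
              simp only [List.mem_singleton] at hb; subst hb; exact fun e => hc (e ▸ ha)⟩
          have hb' : ∀ x ∈ p ++ [c], 0 ≤ x ∧ x < nR := by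
            intro x hx
            rcases List.mem_append.mp hx with h | h
            · exact hb x h
            · simp at h; subst h; exact ⟨hc0, hc1⟩
          have hlen' : (p ++ [c]).length + d = nD.toNat := by simp; omega
          have hIH := IH (p ++ [c]) res hnd' hb' hlen'
          have hcast : (((p ++ [c]).length : Int)) = (p.length : Int) + 1 := by simp
          rw [hcast] at hIH
          simp only [Prod.fst, Prod.snd, hadd, hset1, hIH]
          -- restore col and board
          have hrm : (PySem.Set.remove? (p ++ [c]) c).getD (p ++ [c]) = p := by
            rw [PySem.Set.remove?_of_mem (by simp), pv_discard_append p c hc]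
            rfl
          have hset0 : pvSetCell ((p ++ [c]).map (pvOneHot nR) ++ List.replicate d (pvZeroRow nR))
              ((p.length : Int)) c "0"
              = p.map (pvOneHot nR) ++ List.replicate (d+1) (pvZeroRow nR) := by
            rw [List.map_append, List.map_singleton, List.append_assoc, List.singleton_append,
                show ((p.length : Int)) = (((p.map (pvOneHot nR)).length : Int)) by simp,
                pvSetCell_at _ _ _ _ _ hc0, pvOneHot_reset nR c hc0 hc1, List.replicate_succ]
          simp only [hrm, hset0]
          rw [ihcs (fun x hx => hcs x (by simp [hx])) (res ++ _)]
          simp [List.filter_cons, hc]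
    rw [loop (PySem.List.pyRange 0 nR 1)
        (fun c hcmem => by
          have := PySem.List.mem_pyRange_one.mp hcmem
          omega) res]
    rw [pvDext, List.map_flatMap]
    unfold pvExts
    rw [List.flatMap_map]

theorem matchingBacktracking_eq_dext (nD nR : Int) (hD : 0 ≤ nD) :
    matchingBacktracking nD nR = (pvDext nR nD.toNat []).map (fun q => q.map (pvOneHot nR)) := by
  unfold matchingBacktracking
  have hboard : (PySem.List.pyRange 0 nD 1).map (fun _ => pvZeroRow nR)
      = List.replicate nD.toNat (pvZeroRow nR) := by
    rw [pv_map_const]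
    simp [PySem.List.length_pyRange_one]
  have hmain := pvBacktrack_spec nD nR hD nD.toNat [] [] List.nodup_nil (by simp) (by simp)
  simp only [List.length_nil, Nat.cast_zero, List.map_nil, List.nil_append] at hmain
  simp only [hboard]
  exact congrArg (fun t => t.2.2) hmain

theorem alt_eq_dext (nD nR : Int) (hD : 0 ≤ nD) :
    matchingBacktracking_alt nD nR = (pvDext nR nD.toNat []).map (fun q => q.map (pvOneHot nR)) := by
  unfold matchingBacktracking_alt
  rw [if_neg (by omega)]
  show ((PySem.List.pyRange 0 nD 1).foldl (fun acc _ => pvStep nR acc) [[]]).map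
      (fun q => q.map (pvOneHot nR)) = _
  rw [pv_foldl_const, PySem.List.length_pyRange_one, ← pvDext_eq_iterate]
  simp

-- ===== VERDICT (by name: the statement is the Claim_ definition above) =====
theorem matchingBacktracking_spec : Claim_equal_matchingBacktracking := by
  unfold Claim_equal_matchingBacktracking
  intro nD nR _ hpre
  unfold Spec_matchingBacktracking
  rcases (by omega : 0 ≤ nD ∨ nD < 0) with hD | hD
  · rw [matchingBacktracking_eq_dext nD nR hD, alt_eq_dext nD nR hD]
  · have hR : nR ≤ 0 := by
      have h := hpre; unfold Pre_matchingBacktracking at h; omega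
    have h0 : nD.toNat = 0 := by omega
    have hz : ((0 : Int) == nD) = false := by simp only [beq_eq_false_iff_ne, ne_eq]; omega
    unfold matchingBacktracking matchingBacktracking_alt
    rw [if_pos hD]
    simp only [h0, PySem.List.pyRange_one_eq_nil hD.le]
    simp [pvBacktrack, hz, PySem.List.pyRange_one_eq_nil hR]
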